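-- pv_equiv track=rewrite | github.com/wyattowalsh/agents | skills/discover-skills/scripts/journal-store.py | _split_yaml_list
-- ===== SOURCE A (Python) =====
-- def _split_yaml_list(text: str) -> list[str]:
--     """Split a YAML inline list, respecting quotes."""
--     items: list[str] = []
--     current: list[str] = []
--     in_quote: str | None = None
--     for ch in text:
--         if ch in ('"', "'") and in_quote is None:
--             in_quote = ch
--             current.append(ch)
--         elif ch == in_quote:
--             in_quote = None
--             current.append(ch)
--         elif ch == "," and in_quote is None:
--             items.append("".join(current).strip())
--             current = []
--         else:
--             current.append(ch)
--     if current: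
--         items.append("".join(current).strip())
--     return items
-- ===== SOURCE B (Python) =====
-- def _split_yaml_list(text: str) -> list[str]:
--     """Split a YAML inline list, respecting quotes (boundary-index version)."""
--     cuts: list[int] = []
--     in_quote: str | None = None
--     for i, ch in enumerate(text):
--         if in_quote is None:
--             if ch in ('"', "'"):
--                 in_quote = ch
--             elif ch == ",":
--                 cuts.append(i)
--         elif ch == in_quote:
--             in_quote = None
--     items: list[str] = []
--     prev = 0
--     for idx in cuts:
--         items.append(text[prev:idx].strip())
--         prev = idx + 1
--     if prev < len(text):
--         items.append(text[prev:].strip())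
--     return items
-- ===== Notes on version B (the rewrite author's own statement) =====
-- stated objective: alternative
-- what changed: B replaces A's accumulate-characters-and-join scan by two passes: one quote-tracking pass that records only the indices of top-level commas, then a slicing pass that cuts the original string at those boundaries and strips each segment.
import Mathlib
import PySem

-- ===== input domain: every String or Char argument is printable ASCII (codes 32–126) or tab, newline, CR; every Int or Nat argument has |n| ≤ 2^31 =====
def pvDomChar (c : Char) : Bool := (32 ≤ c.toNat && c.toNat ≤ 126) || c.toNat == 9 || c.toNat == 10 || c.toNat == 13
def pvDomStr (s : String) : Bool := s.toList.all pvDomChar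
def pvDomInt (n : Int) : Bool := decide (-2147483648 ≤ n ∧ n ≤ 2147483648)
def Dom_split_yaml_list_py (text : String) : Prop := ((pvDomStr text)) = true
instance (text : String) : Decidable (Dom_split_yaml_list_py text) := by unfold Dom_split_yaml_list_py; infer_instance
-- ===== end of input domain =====

-- B splits by recording top-level comma indices in one pass and slicing/stripping the
-- original string at those boundaries, instead of A's accumulate-characters-and-join scan
-- (alternative decomposition, same linear cost).


-- ===== PORT A =====
-- the for-loop with state (items, current, in_quote); the trailing `if current` is the [] case
def pvALoop : List Char → List String → List Char → Option Char → List String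
  | [], items, current, _ =>
    if current.isEmpty then items else items ++ [PySem.Str.strip (String.ofList current)]
  | ch :: rest, items, current, inq =>
    if (ch = '"' ∨ ch = '\'') ∧ inq = none then
      pvALoop rest items (current ++ [ch]) (some ch)
    else if some ch = inq then
      pvALoop rest items (current ++ [ch]) none
    else if ch = ',' ∧ inq = none then
      pvALoop rest (items ++ [PySem.Str.strip (String.ofList current)]) [] inq
    else
      pvALoop rest items (current ++ [ch]) inq

def split_yaml_list_py (text : String) : List String :=
  pvALoop text.toList [] [] none

-- ===== PORT B =====
-- first pass: `for i, ch in enumerate(text)` collecting top-level comma indices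
def pvBScan : List Char → Nat → Option Char → List Nat
  | [], _, _ => []
  | ch :: rest, i, none =>
    if ch = '"' ∨ ch = '\'' then pvBScan rest (i + 1) (some ch)
    else if ch = ',' then i :: pvBScan rest (i + 1) none
    else pvBScan rest (i + 1) none
  | ch :: rest, i, some q =>
    if ch = q then pvBScan rest (i + 1) none else pvBScan rest (i + 1) (some q)

-- second pass: `for idx in cuts` slicing text[prev:idx]; tail appended iff prev < len(text)
def pvBEmit (t : List Char) : List Nat → Nat → List String
  | [], prev =>
    if prev < t.length then
      [PySem.Str.strip (String.ofList (PySem.List.slice t (some (prev : Int)) none))]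
    else []
  | idx :: rest, prev =>
    PySem.Str.strip (String.ofList (PySem.List.slice t (some (prev : Int)) (some (idx : Int))))
      :: pvBEmit t rest (idx + 1)

def split_yaml_list_py_alt (text : String) : List String :=
  pvBEmit text.toList (pvBScan text.toList 0 none) 0

-- ===== PRECONDITION & SPEC =====
def Spec_split_yaml_list_py (text : String) (out : List String) : Prop := out = split_yaml_list_py_alt text
instance (text : String) (out : List String) : Decidable (Spec_split_yaml_list_py text out) := by unfold Spec_split_yaml_list_py; infer_instance

-- ===== CLAIM (what is proved, stated in full; the proofs are below) =====
def Claim_equal_split_yaml_list_py : Prop := ∀ (text : String), Dom_split_yaml_list_py text → Spec_split_yaml_list_py text (split_yaml_list_py text)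

-- ===== LEMMAS AND PROOFS =====

-- A's items list is a pure accumulator
lemma pvALoop_items (l : List Char) (items : List String) (current : List Char)
    (inq : Option Char) : pvALoop l items current inq = items ++ pvALoop l [] current inq := by
  induction l generalizing items current inq with
  | nil =>
    simp only [pvALoop]
    by_cases h : current.isEmpty <;> simp [h]
  | cons ch rest ih =>
    simp only [pvALoop]
    by_cases h1 : (ch = '"' ∨ ch = '\'') ∧ inq = none
    · simp only [if_pos h1]; exact ih ..
    · simp only [if_neg h1]
      by_cases h2 : some ch = inq
      · simp only [if_pos h2]; exact ih ..
      · simp only [if_neg h2]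
        by_cases h3 : ch = ',' ∧ inq = none
        · simp only [if_pos h3]
          rw [ih (items ++ [_]), ih ([] ++ [_])]
          simp
        · simp only [if_neg h3]; exact ih ..

lemma pv_take_succ {t : List Char} {prev s : Nat} (hps : prev ≤ s) (hs : s < t.length) :
    (t.drop prev).take (s + 1 - prev) = (t.drop prev).take (s - prev) ++ [t[s]] := by
  have h1 : s + 1 - prev = (s - prev) + 1 := by omega
  have h2 : (t.drop prev)[s - prev]? = some t[s] := by
    rw [List.getElem?_drop]
    have h3 : prev + (s - prev) = s := by omega
    rw [h3, List.getElem?_eq_getElem hs]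
  rw [h1, List.take_add_one, h2]
  rfl

-- the bridge: B's slicing emission from the recorded cuts equals A's scan on the suffix
lemma pv_bridge (rest : List Char) (t : List Char) (s prev : Nat) (inq : Option Char)
    (hdrop : t.drop s = rest) (hps : prev ≤ s) :
    pvBEmit t (pvBScan rest s inq) prev
      = pvALoop rest [] ((t.drop prev).take (s - prev)) inq := by
  induction rest generalizing s prev inq with
  | nil =>
    have hs : t.length ≤ s := by
      by_contra h
      have := List.drop_eq_nil_iff.mp hdrop
      omega
    have hcur : (t.drop prev).take (s - prev) = t.drop prev := by
      apply List.take_of_length_le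
      simp
      omega
    simp only [pvBScan, pvBEmit, pvALoop, hcur]
    rw [PySem.List.slice_from_natCast]
    by_cases h : prev < t.length
    · rw [if_pos h, if_neg (by simp [List.isEmpty_iff, List.drop_eq_nil_iff]; omega)]
      simp
    · rw [if_neg h, if_pos (by simp [List.isEmpty_iff, List.drop_eq_nil_iff]; omega)]
  | cons ch rest ih =>
    have hs : s < t.length := by
      have := congrArg List.length hdrop
      simp [List.length_drop] at this
      omega
    have hch : t[s] = ch := by
      have h0 := congrArg (fun l => l[0]?) hdrop
      simpa [List.getElem?_drop, List.getElem?_eq_getElem hs] using h0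
    have hdrop' : t.drop (s + 1) = rest := by
      have h0 := congrArg List.tail hdrop
      simpa [List.tail_drop] using h0
    have hcur : (t.drop prev).take (s + 1 - prev) = (t.drop prev).take (s - prev) ++ [ch] := by
      rw [pv_take_succ hps hs, hch]
    match inq with
    | none =>
      by_cases hq : ch = '"' ∨ ch = '\''
      · simp only [pvBScan, pvALoop]
        rw [if_pos hq, ih (s + 1) prev (some ch) hdrop' (by omega), hcur]
        simp [hq]
      · by_cases hc : ch = ','
        · simp only [pvBScan, pvALoop]
          rw [if_neg hq, if_pos hc]
          simp only [pvBEmit]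
          rw [ih (s + 1) (s + 1) none hdrop' le_rfl, pvALoop_items rest ([] ++ [_]),
            PySem.List.slice_natCast]
          simp [hc]
        · simp only [pvBScan, pvALoop]
          rw [if_neg hq, if_neg hc, ih (s + 1) prev none hdrop' (by omega), hcur]
          simp [hq, hc]
    | some q =>
      by_cases he : ch = q
      · simp only [pvBScan, pvALoop]
        rw [if_pos he, ih (s + 1) prev none hdrop' (by omega), hcur]
        simp [he]
      · simp only [pvBScan, pvALoop]
        rw [if_neg he, ih (s + 1) prev (some q) hdrop' (by omega), hcur]
        simp [he]

-- ===== VERDICT (by name: the statement is the Claim_ definition above) =====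
theorem split_yaml_list_py_spec : Claim_equal_split_yaml_list_py := by
  intro text _
  unfold Spec_split_yaml_list_py split_yaml_list_py split_yaml_list_py_alt
  rw [pv_bridge text.toList text.toList 0 0 none rfl le_rfl]
  simp
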